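-- pv_equiv track=rewrite | github.com/LukaToni/Kakuro-solver | backtracing.py | possible_combinations
-- ===== SOURCE A (Python) =====
-- import itertools
--
-- def possible_combinations(st_polj, sestevek):
--     all = set()
--     rez = set()
--     all_possible_num = []
--     numbers = [1,2,3,4,5,6,7,8,9]
--     # dobiš vse pare kombinacij za dano vsoto in podano število polj
--     for seq in itertools.combinations(numbers, st_polj):
--         if sum(seq) == sestevek:
--             rez.add(seq)
--
--     for el in rez:
--         perm = possible_permutation(el)
--         for sol in perm:
--             all.add(sol)
--
--     return all
--
-- def possible_permutation(array):
--      perm = [x for x in itertools.permutations(array)]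
--      return perm
-- ===== SOURCE B (Python) =====
-- import itertools
--
-- def possible_combinations(st_polj, sestevek):
--     out = []
--
--     def extend(start, left, remaining, chosen):
--         if left == 0:
--             if remaining == 0:
--                 out.extend(itertools.permutations(chosen))
--             return
--         for d in range(start, 10):
--             if d > remaining:
--                 break
--             extend(d + 1, left - 1, remaining - d, chosen + (d,))
--
--     extend(1, st_polj, sestevek, ())
--     return set(out)
-- ===== Notes on version B (the rewrite author's own statement) =====
-- stated objective: alternative
-- what changed: Replaces A's two-stage pipeline (enumerate all combinations, filter by sum into a set, then expand each through itertools.permutations into another set) by a single recursive backtracking pass that extends an increasing digit prefix, prunes a branch as soon as the next digit alone exceeds the remaining sum, and emits the permutations of each completed selection directly, with no intermediate sets.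
import Mathlib
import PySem

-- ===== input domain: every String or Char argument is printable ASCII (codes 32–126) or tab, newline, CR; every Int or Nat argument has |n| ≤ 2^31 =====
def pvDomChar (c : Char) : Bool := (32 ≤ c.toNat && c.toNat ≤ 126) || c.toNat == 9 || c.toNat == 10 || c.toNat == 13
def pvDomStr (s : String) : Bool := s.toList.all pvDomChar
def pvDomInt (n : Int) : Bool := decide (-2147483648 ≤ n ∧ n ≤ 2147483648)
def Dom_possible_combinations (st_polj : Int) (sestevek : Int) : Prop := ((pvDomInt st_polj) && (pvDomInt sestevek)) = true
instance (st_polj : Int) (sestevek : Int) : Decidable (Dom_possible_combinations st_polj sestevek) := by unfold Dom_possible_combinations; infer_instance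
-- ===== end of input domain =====

-- B replaces A's combine-filter-then-expand pipeline with intermediate sets by one pruned
-- recursive backtracking pass over increasing digit choices (objective: alternative).
-- Both programs return a Python set; equality is proved on the modelled insertion-order list.

-- ===== PORT A =====
def possible_permutation (array : List Int) : List (List Int) :=
  PySem.List.permutations array array.length

-- st_polj.toNat: itertools.combinations raises ValueError for negative r; Pre_ excludes st_polj < 0.
def possible_combinations (st_polj : Int) (sestevek : Int) : List (List Int) :=
  let numbers : List Int := [1,2,3,4,5,6,7,8,9]
  let rez : PySem.Set (List Int) :=
    (PySem.List.combinations numbers st_polj.toNat).foldl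
      (fun s seq => if seq.sum = sestevek then PySem.Set.add s seq else s) PySem.Set.empty
  let all : PySem.Set (List Int) :=
    rez.foldl (fun a el =>
      (possible_permutation el).foldl (fun a2 sol => PySem.Set.add a2 sol) a) PySem.Set.empty
  all

-- ===== PORT B =====
-- the inner 'for d in range(start, 10): if d > remaining: break; …' is the takeWhile prefix of
-- the range (exact for Python's break); '.attach' only carries the membership proof for termination
def pcExtend (start : Nat) (left : Int) (remaining : Int) (chosen : List Int) : List (List Int) :=
  if left = 0 then
    (if remaining = 0 then PySem.List.permutations chosen chosen.length else [])
  else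
    ((List.range' start (10 - start)).takeWhile (fun d : Nat => decide ((d : Int) ≤ remaining))).attach.flatMap
      (fun d => pcExtend (d.1 + 1) (left - 1) (remaining - (d.1 : Int)) (chosen ++ [(d.1 : Int)]))
termination_by 10 - start
decreasing_by
  have hm : d.1 ∈ List.range' start (10 - start) := (List.takeWhile_sublist _).subset d.2
  have := List.mem_range'_1.mp hm
  omega

def possible_combinations_alt (st_polj : Int) (sestevek : Int) : List (List Int) :=
  PySem.Set.ofList (pcExtend 1 st_polj sestevek [])

-- ===== PRECONDITION & SPEC =====
-- A raises ValueError (combinations with negative r) iff st_polj < 0; Pre_ excludes exactly that.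
def Pre_possible_combinations (st_polj : Int) (sestevek : Int) : Prop := 0 ≤ st_polj
instance (st_polj : Int) (sestevek : Int) : Decidable (Pre_possible_combinations st_polj sestevek) := by unfold Pre_possible_combinations; infer_instance
def pvWitness_possible_combinations : Int × Int := (2, 5)

def Spec_possible_combinations (st_polj : Int) (sestevek : Int) (out : List (List Int)) : Prop := out = possible_combinations_alt st_polj sestevek
instance (st_polj : Int) (sestevek : Int) (out : List (List Int)) : Decidable (Spec_possible_combinations st_polj sestevek out) := by unfold Spec_possible_combinations; infer_instance

-- ===== CLAIM (what is proved, stated in full; the proofs are below) =====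
def Claim_equal_possible_combinations : Prop := ∀ (st_polj : Int) (sestevek : Int), Dom_possible_combinations st_polj sestevek → Pre_possible_combinations st_polj sestevek → Spec_possible_combinations st_polj sestevek (possible_combinations st_polj sestevek)

-- ===== LEMMAS AND PROOFS =====

-- the digits still available once the backtracking has advanced to `start`
def digitsFrom (start : Nat) : List Int := (List.range' start (10 - start)).map (fun d : Nat => (d : Int))

lemma digitsFrom_cons {start : Nat} (h : start ≤ 9) :
    digitsFrom start = (start : Int) :: digitsFrom (start + 1) := by
  have h10 : 10 - start = (10 - (start + 1)) + 1 := by omega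
  simp [digitsFrom, h10, List.range'_succ]

lemma mem_digitsFrom {start : Nat} {x : Int} (hx : x ∈ digitsFrom start) : (start : Int) ≤ x := by
  unfold digitsFrom at hx
  obtain ⟨d, hd, rfl⟩ := List.mem_map.mp hx
  exact_mod_cast (List.mem_range'_1.mp hd).1

lemma sum_ge_of_mem_combinations {start n : Nat} {c : List Int}
    (hc : c ∈ PySem.List.combinations (digitsFrom start) (n + 1)) : (start : Int) ≤ c.sum := by
  have hsub := PySem.List.sublist_of_mem_combinations hc
  have hlen := PySem.List.length_of_mem_combinations hc
  match c, hlen with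
  | x :: rest, _ =>
    have hx : (start : Int) ≤ x := mem_digitsFrom (hsub.subset (by simp))
    have hrest : 0 ≤ rest.sum := by
      apply List.sum_nonneg
      intro a ha
      have h2 : (start : Int) ≤ a := mem_digitsFrom (hsub.subset (by simp [ha]))
      exact le_trans (Int.natCast_nonneg start) h2
    simp only [List.sum_cons]
    linarith

lemma pcExtend_pos (start : Nat) (left rem : Int) (chosen : List Int) (h : ¬ left = 0) :
    pcExtend start left rem chosen =
      ((List.range' start (10 - start)).takeWhile (fun d : Nat => decide ((d : Int) ≤ rem))).flatMap
        (fun d => pcExtend (d + 1) (left - 1) (rem - (d : Int)) (chosen ++ [(d : Int)])) := by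
  rw [pcExtend]
  simp [h]

-- B's backtracking from `start` enumerates exactly A's qualifying combinations of the remaining
-- digits, in the same lexicographic order, each expanded to its permutations.
lemma pcExtend_eq (start : Nat) (n : Nat) (rem : Int) (chosen : List Int) :
    pcExtend start (n : Int) rem chosen =
      ((PySem.List.combinations (digitsFrom start) n).filter (fun c => decide (c.sum = rem))).flatMap
        (fun c => PySem.List.permutations (chosen ++ c) (chosen ++ c).length) := by
  cases n with
  | zero =>
    rw [pcExtend]
    simp only [PySem.List.combinations_zero, Nat.cast_zero, if_true]
    by_cases hr : rem = 0
    · simp [hr]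
    · simp [hr, eq_comm]
  | succ m =>
    have hneq : ((m + 1 : Nat) : Int) ≠ 0 := by exact_mod_cast Nat.succ_ne_zero m
    rw [pcExtend_pos _ _ _ _ hneq]
    by_cases hs : start ≤ 9
    · have hrange : List.range' start (10 - start)
          = start :: List.range' (start + 1) (10 - (start + 1)) := by
        have h10 : 10 - start = (10 - (start + 1)) + 1 := by omega
        rw [h10, List.range'_succ]
      rw [hrange]
      by_cases hr : (start : Int) ≤ rem
      · rw [List.takeWhile_cons_of_pos (by simpa using hr)]
        rw [List.flatMap_cons]
        have hIH1 := pcExtend_eq (start + 1) m (rem - (start : Int)) (chosen ++ [(start : Int)])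
        have hIH2 := pcExtend_eq (start + 1) (m + 1) rem chosen
        rw [pcExtend_pos _ _ _ _ hneq] at hIH2
        have hcast : ((m + 1 : Nat) : Int) - 1 = ((m : Nat) : Int) := by push_cast; ring
        rw [hcast] at hIH2
        rw [hcast, hIH1, hIH2]
        rw [digitsFrom_cons hs, PySem.List.combinations_cons_succ]
        rw [List.filter_append, List.flatMap_append]
        congr 1
        symm
        rw [List.filter_map, List.flatMap_map]
        rw [List.filter_congr (q := fun c => decide (c.sum = rem - (start : Int))) ?_]
        · exact List.flatMap_congr (fun c _ => by
            rw [show chosen ++ (start : Int) :: c = (chosen ++ [(start : Int)]) ++ c by simp])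
        · intro c _
          simp only [Function.comp_apply, List.sum_cons]
          rw [decide_eq_decide]
          omega
      · rw [List.takeWhile_cons_of_neg (by simpa using hr)]
        simp only [List.flatMap_nil]
        rw [List.filter_eq_nil_iff.mpr, List.flatMap_nil]
        intro c hc
        have := sum_ge_of_mem_combinations hc
        simp only [decide_eq_true_eq]
        omega
    · have h0 : 10 - start = 0 := by omega
      have hd : digitsFrom start = [] := by unfold digitsFrom; rw [h0]; rfl
      rw [h0, hd, PySem.List.combinations_nil_succ]
      simp
termination_by 10 - start
decreasing_by all_goals omega

lemma nodup_combinations {α : Type} [DecidableEq α] (xs : List α) (r : Nat) (h : xs.Nodup) :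
    (PySem.List.combinations xs r).Nodup := by
  induction xs generalizing r with
  | nil =>
    cases r with
    | zero => simp [PySem.List.combinations_zero]
    | succ m => simp [PySem.List.combinations_nil_succ]
  | cons x xs ih =>
    cases r with
    | zero => simp [PySem.List.combinations_zero]
    | succ m =>
      rw [PySem.List.combinations_cons_succ]
      have hx : x ∉ xs := (List.nodup_cons.mp h).1
      have hxs : xs.Nodup := (List.nodup_cons.mp h).2
      apply List.Nodup.append
      · exact (ih m hxs).map (fun a b hab => (List.cons.injEq x a x b).mp hab |>.2)
      · exact ih (m + 1) hxs
      · intro a ha hb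
        obtain ⟨c, _, rfl⟩ := List.mem_map.mp ha
        have hsub := PySem.List.sublist_of_mem_combinations hb
        exact hx (hsub.subset (by simp))

lemma foldl_add_of_nodup (xs s : List (List Int)) (h : (s ++ xs).Nodup) :
    xs.foldl PySem.Set.add s = s ++ xs := by
  induction xs generalizing s with
  | nil => simp
  | cons x xs ih =>
    obtain ⟨h1, h2, hdisj⟩ := List.nodup_append.mp h
    have hx : x ∉ s := fun hxs => hdisj x hxs x (by simp) rfl
    have hadd : PySem.Set.add s x = s ++ [x] := by
      simp [PySem.Set.add, PySem.Set.contains, hx]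
    rw [List.foldl_cons, hadd, ih (s ++ [x]) (by simpa using h)]
    simp

lemma foldl_inner_eq_flatMap (L : List (List Int)) (s : List (List Int))
    (g : List Int → List (List Int)) :
    L.foldl (fun a el => (g el).foldl (fun a2 sol => PySem.Set.add a2 sol) a) s
      = (L.flatMap g).foldl PySem.Set.add s := by
  induction L generalizing s with
  | nil => simp
  | cons el L ih =>
    rw [List.foldl_cons, List.flatMap_cons, List.foldl_append, ih]

-- ===== VERDICT (by name: the statement is the Claim_ definition above) =====
theorem possible_combinations_spec : Claim_equal_possible_combinations := by
  intro st sest hdom hpre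
  unfold Spec_possible_combinations
  have hst : ((st.toNat : Nat) : Int) = st := Int.toNat_of_nonneg hpre
  -- characterise A
  have hnd : (((PySem.List.combinations ([1,2,3,4,5,6,7,8,9] : List Int) st.toNat)).filter
      (fun c => decide (c.sum = sest))).Nodup :=
    (nodup_combinations _ _ (by decide)).filter _
  have hA : possible_combinations st sest
      = (((PySem.List.combinations ([1,2,3,4,5,6,7,8,9] : List Int) st.toNat).foldl
          (fun s seq => if seq.sum = sest then PySem.Set.add s seq else s) PySem.Set.empty).foldl
          (fun a el => (possible_permutation el).foldl (fun a2 sol => PySem.Set.add a2 sol) a)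
          PySem.Set.empty) := rfl
  rw [hA, PySem.List.foldl_ite_eq_foldl_filter]
  have hrez : ((PySem.List.combinations ([1,2,3,4,5,6,7,8,9] : List Int) st.toNat).filter
        (fun c => decide (c.sum = sest))).foldl PySem.Set.add PySem.Set.empty
      = (PySem.List.combinations ([1,2,3,4,5,6,7,8,9] : List Int) st.toNat).filter
        (fun c => decide (c.sum = sest)) := by
    simpa using foldl_add_of_nodup _ [] (by simpa using hnd)
  rw [hrez, foldl_inner_eq_flatMap]
  -- characterise B
  have hB : pcExtend 1 st sest []
      = ((PySem.List.combinations (digitsFrom 1) st.toNat).filter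
          (fun c => decide (c.sum = sest))).flatMap
          (fun c => PySem.List.permutations ([] ++ c) ([] ++ c).length) := by
    have hbb := pcExtend_eq 1 st.toNat sest []
    rwa [hst] at hbb
  unfold possible_combinations_alt
  rw [hB, show digitsFrom 1 = ([1,2,3,4,5,6,7,8,9] : List Int) by decide]
  simp only [List.nil_append]
  rfl
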